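-- pv_equiv track=rewrite | github.com/aashusingh/WSD-RSTParser | RST_parser/rst_parser/lesk.py | compare_overlaps3
-- ===== SOURCE A (Python) =====
-- import itertools
--
-- def compare_overlaps3( wordsign_dict, \
--                      nbest=False, keepscore=False, normalizescore=False):
--     """
--
--     """
--     final_overlap = []
--     overlaplen_synsets = []
--
--     temp_list = list(itertools.combinations(wordsign_dict.keys(),2))
--     keycombo_list = temp_list
--
--
--     for word1, word2 in keycombo_list:
--         fsynsets_signatures = wordsign_dict[word1]
--         ssynsets_signatures = wordsign_dict[word2]
--         for ss in fsynsets_signatures: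
--                 for pp in ssynsets_signatures:
--                     overlaps = (set(fsynsets_signatures[ss]).intersection(set(ssynsets_signatures[pp])))
--                     overlaplen_synsets.append((len(overlaps), ss))
--
--
--     ranked_synsets = sorted(overlaplen_synsets, reverse=True)
--     if ranked_synsets:
--         return ranked_synsets[0]
--     else: return []
-- ===== SOURCE B (Python) =====
-- def compare_overlaps3(wordsign_dict, nbest=False, keepscore=False, normalizescore=False):
--     # Precompute each word's (synset, signature-set) rows once, then stream a
--     # running maximum over all cross-word signature pairs: no sort, no repeated
--     # set() conversions inside the inner loops.
--     sigs = [[(ss, frozenset(sig)) for ss, sig in d.items()]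
--             for d in wordsign_dict.values()]
--     best = None
--     for k, row in enumerate(sigs):
--         for ss, s1 in row:
--             for other in sigs[k + 1:]:
--                 for pp, s2 in other:
--                     cand = (len(s1 & s2), ss)
--                     if best is None or cand > best:
--                         best = cand
--     return best if best is not None else []
-- ===== Notes on version B (the rewrite author's own statement) =====
-- stated objective: faster
-- what changed: B drops the build-a-list / sort-descending / take-[0] pipeline: it precomputes each word's (synset, signature-set) rows once and streams a single running maximum over the cross-word signature pairs (no sort, no repeated set() conversion inside the inner loops, no intermediate candidate list, no key-combinations list: it walks tail pairs of the rows positionally).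
-- outside the precondition, e.g. on compare_overlaps3({}, False, False, False): A returns (), B returns (); on compare_overlaps3({'a': {'s': ['x']}, 'b': {}}, False, False, False): A returns (), B returns ()
import Mathlib
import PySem

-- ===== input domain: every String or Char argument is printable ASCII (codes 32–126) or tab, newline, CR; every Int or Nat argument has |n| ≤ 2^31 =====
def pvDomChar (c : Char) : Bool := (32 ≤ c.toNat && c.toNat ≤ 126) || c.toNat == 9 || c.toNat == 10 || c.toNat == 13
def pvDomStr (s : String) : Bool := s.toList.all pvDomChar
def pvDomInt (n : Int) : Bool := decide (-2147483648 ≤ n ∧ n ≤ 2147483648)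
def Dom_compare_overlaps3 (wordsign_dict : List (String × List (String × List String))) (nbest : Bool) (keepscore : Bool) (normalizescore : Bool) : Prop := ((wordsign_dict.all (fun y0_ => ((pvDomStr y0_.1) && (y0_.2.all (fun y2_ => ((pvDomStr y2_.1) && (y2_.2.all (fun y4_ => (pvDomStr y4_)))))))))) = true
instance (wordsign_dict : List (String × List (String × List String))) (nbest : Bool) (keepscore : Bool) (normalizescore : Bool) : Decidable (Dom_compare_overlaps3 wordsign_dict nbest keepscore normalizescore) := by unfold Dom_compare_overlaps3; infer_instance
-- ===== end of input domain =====

-- B replaces A's build-candidates / sort-descending / take-first pipeline by one streamed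
-- running maximum over signature sets precomputed once per word (objective: faster, measured).

-- ===== PORT A =====
-- one iteration of A's 'for word1, word2 in keycombo_list' loop body
def pvStepA (d : PySem.Dict String (List (String × List String)))
    (acc : List (Int × String)) (combo : List String) : List (Int × String) :=
  match combo with
  | [word1, word2] =>
    let f := PySem.Dict.ofList (d.getD word1 [])
    let s := PySem.Dict.ofList (d.getD word2 [])
    f.keys.foldl (fun acc ss =>
      s.keys.foldl (fun acc pp =>
        acc ++ [(PySem.Set.len (PySem.Set.inter (PySem.Set.ofList (f.getD ss []))
                  (PySem.Set.ofList (s.getD pp []))), ss)]) acc) acc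
  | _ => acc

def compare_overlaps3 (wordsign_dict : List (String × List (String × List String))) (nbest : Bool) (keepscore : Bool) (normalizescore : Bool) : Int × String :=
  let d := PySem.Dict.ofList wordsign_dict
  let keycombo_list := PySem.List.combinations d.keys 2
  let overlaplen_synsets := keycombo_list.foldl (pvStepA d) []
  match PySem.List.sorted2 overlaplen_synsets Prod.fst Prod.snd true with
  | r :: _ => r
  | [] => (0, "")  -- Python returns [] here (not an (int, str) pair); excluded by Pre_

-- ===== PORT B =====
-- cand > best on Python tuples (int, str)
def pvGtB (a b : Int × String) : Bool := decide (b.1 < a.1) || (decide (a.1 = b.1) && decide (b.2 < a.2))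

-- 'if best is None or cand > best: best = cand'
def pvBump (best : Option (Int × String)) (c : Int × String) : Option (Int × String) :=
  match best with
  | none => some c
  | some b => if pvGtB c b then some c else some b

-- 'for pp, s2 in other: …'
def pvCross (ss : String) (s1 : PySem.Set String) (other : List (String × PySem.Set String))
    (best : Option (Int × String)) : Option (Int × String) :=
  other.foldl (fun best q => pvBump best (PySem.Set.len (PySem.Set.inter s1 q.2), ss)) best

-- 'for ss, s1 in row: for other in sigs[k+1:]: …'
def pvRow (row : List (String × PySem.Set String)) (rest : List (List (String × PySem.Set String)))
    (best : Option (Int × String)) : Option (Int × String) :=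
  row.foldl (fun best p => rest.foldl (fun best other => pvCross p.1 p.2 other best) best) best

-- 'for k, row in enumerate(sigs): …' with sigs[k+1:] as the structural tail
def pvScan : List (List (String × PySem.Set String)) → Option (Int × String) → Option (Int × String)
  | [], best => best
  | row :: rest, best => pvScan rest (pvRow row rest best)

def compare_overlaps3_alt (wordsign_dict : List (String × List (String × List String))) (nbest : Bool) (keepscore : Bool) (normalizescore : Bool) : Int × String :=
  let sigs := (PySem.Dict.ofList wordsign_dict).values.map
    (fun dd => (PySem.Dict.ofList dd).items.map (fun p => (p.1, PySem.Set.ofList p.2)))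
  match pvScan sigs none with
  | some t => t
  | none => (0, "")  -- Python returns [] here; excluded by Pre_

-- ===== PRECONDITION & SPEC =====
-- Pre_ excludes exactly the inputs on which A finds no cross-word signature pair and returns
-- the empty list [] — not an (int, str) value of the declared return type: fewer than two
-- words (after dict key collapse) carry a nonempty signature dict.
def Pre_compare_overlaps3 (wordsign_dict : List (String × List (String × List String))) (nbest : Bool) (keepscore : Bool) (normalizescore : Bool) : Prop :=
  2 ≤ ((PySem.Dict.ofList wordsign_dict).values.filter (fun v => !v.isEmpty)).length

instance (wordsign_dict : List (String × List (String × List String))) (nbest : Bool) (keepscore : Bool) (normalizescore : Bool) : Decidable (Pre_compare_overlaps3 wordsign_dict nbest keepscore normalizescore) := by unfold Pre_compare_overlaps3; infer_instance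

def pvWitness_compare_overlaps3 : (List (String × List (String × List String))) × Bool × Bool × Bool :=
  ([("run", [("run.v.01", ["move", "fast"]), ("run.v.02", ["flow"])]),
    ("move", [("move.v.01", ["move", "go"])])], false, false, false)

def Spec_compare_overlaps3 (wordsign_dict : List (String × List (String × List String))) (nbest : Bool) (keepscore : Bool) (normalizescore : Bool) (out : Int × String) : Prop := out = compare_overlaps3_alt wordsign_dict nbest keepscore normalizescore
instance (wordsign_dict : List (String × List (String × List String))) (nbest : Bool) (keepscore : Bool) (normalizescore : Bool) (out : Int × String) : Decidable (Spec_compare_overlaps3 wordsign_dict nbest keepscore normalizescore out) := by unfold Spec_compare_overlaps3; infer_instance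

-- ===== CLAIM (what is proved, stated in full; the proofs are below) =====
def Claim_equal_compare_overlaps3 : Prop := ∀ (wordsign_dict : List (String × List (String × List String))) (nbest : Bool) (keepscore : Bool) (normalizescore : Bool), Dom_compare_overlaps3 wordsign_dict nbest keepscore normalizescore → Pre_compare_overlaps3 wordsign_dict nbest keepscore normalizescore → Spec_compare_overlaps3 wordsign_dict nbest keepscore normalizescore (compare_overlaps3 wordsign_dict nbest keepscore normalizescore)

-- ===== LEMMAS AND PROOFS =====

-- the Python tuple order on (int, str) candidates, as the lexicographic order
def pvKey (c : Int × String) : Lex (Int × String) := toLex c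

-- the candidate stream B's loops traverse
def pvCands : List (List (String × PySem.Set String)) → List (Int × String)
  | [] => []
  | row :: rest =>
      row.flatMap (fun p => rest.flatMap (fun o =>
        o.map (fun q => ((PySem.Set.inter p.2 q.2).len, p.1)))) ++ pvCands rest

-- the candidate list A's loops build, per ordered pair of word values
def pvBlockA (v1 v2 : List (String × List String)) : List (Int × String) :=
  let f := PySem.Dict.ofList v1
  let s := PySem.Dict.ofList v2
  f.keys.flatMap (fun ss => s.keys.map (fun pp =>
    (PySem.Set.len (PySem.Set.inter (PySem.Set.ofList (f.getD ss []))
      (PySem.Set.ofList (s.getD pp []))), ss)))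

def pvLA : List (List (String × List String)) → List (Int × String)
  | [] => []
  | v :: rest => rest.flatMap (pvBlockA v) ++ pvLA rest

-- B's rows, as a function of the stored word values
def pvRowOf (v : List (String × List String)) : List (String × PySem.Set String) :=
  (PySem.Dict.ofList v).items.map (fun p => (p.1, PySem.Set.ofList p.2))

theorem pvGtB_eq (a b : Int × String) : pvGtB a b = decide (pvKey b < pvKey a) := by
  simp [pvGtB, pvKey, Prod.Lex.lt_iff, eq_comm]

-- B's running maximum: characterisation of the fold
theorem pvBump_ne_none (cs : List (Int × String)) (x : Int × String) :
    cs.foldl pvBump (some x) ≠ none := by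
  induction cs generalizing x with
  | nil => simp
  | cons c t ih =>
    simp only [List.foldl_cons, pvBump]
    split <;> exact ih _

theorem pvBump_max (cs : List (Int × String)) (b : Option (Int × String)) (m : Int × String)
    (h : cs.foldl pvBump b = some m) :
    (b = some m ∨ m ∈ cs) ∧ (∀ c ∈ cs, pvKey c ≤ pvKey m) ∧ (∀ x, b = some x → pvKey x ≤ pvKey m) := by
  induction cs generalizing b with
  | nil =>
    simp at h
    subst h
    exact ⟨Or.inl rfl, by simp, fun x hx => by simp at hx; subst hx; exact le_refl _⟩
  | cons c t ih =>
    simp only [List.foldl_cons] at h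
    obtain ⟨h1, h2, h3⟩ := ih _ h
    have hbc : ∀ x, pvBump b c = some x → (x = c ∨ b = some x) ∧ pvKey c ≤ pvKey x := by
      intro x hx
      cases b with
      | none => simp [pvBump] at hx; subst hx; exact ⟨Or.inl rfl, le_refl _⟩
      | some y =>
        simp only [pvBump] at hx
        rw [pvGtB_eq] at hx
        by_cases hlt : pvKey y < pvKey c
        · simp [hlt] at hx; subst hx; exact ⟨Or.inl rfl, le_refl _⟩
        · simp [hlt] at hx; subst hx; exact ⟨Or.inr rfl, le_of_not_gt hlt⟩
    constructor
    · rcases h1 with h1 | h1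
      · rcases (hbc m h1).1 with h | h
        · exact Or.inr (by simp [h])
        · exact Or.inl h
      · exact Or.inr (List.mem_cons_of_mem _ h1)
    refine ⟨?_, ?_⟩
    · intro x hx
      rcases List.mem_cons.mp hx with rfl | hx
      · rcases h1 with h1 | h1
        · exact (hbc m h1).2
        · cases hb : pvBump b x with
          | none => cases b <;> simp [pvBump] at hb; revert hb; split <;> simp
          | some z => exact le_trans (hbc z hb).2 (h3 z hb)
      · exact h2 x hx
    · intro x hx
      subst hx
      cases hb : pvBump (some x) c with
      | none => simp [pvBump] at hb; revert hb; split <;> simp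
      | some z =>
        have hz := hbc z hb
        have hxz : pvKey x ≤ pvKey z := by
          rcases hz.1 with rfl | hz1
          · simp only [pvBump] at hb
            rw [pvGtB_eq] at hb
            by_cases hlt : pvKey x < pvKey z
            · exact le_of_lt hlt
            · simp [hlt] at hb; subst hb; exact le_refl _
          · simp at hz1; subst hz1; exact le_refl _
        exact le_trans hxz (h3 z hb)

theorem pvScan_eq (rows : List (List (String × PySem.Set String))) (b : Option (Int × String)) :
    pvScan rows b = (pvCands rows).foldl pvBump b := by
  induction rows generalizing b with
  | nil => rfl
  | cons row rest ih =>
    simp [pvScan, pvCands, List.foldl_append, List.foldl_flatMap, List.foldl_map, ih, pvRow, pvCross]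

theorem pvStepA_pair (d : PySem.Dict String (List (String × List String)))
    (p q : String × List (String × List String)) (acc : List (Int × String))
    (hp : d.getD p.1 [] = p.2) (hq : d.getD q.1 [] = q.2) :
    pvStepA d acc [p.1, q.1] = acc ++ pvBlockA p.2 q.2 := by
  simp only [pvStepA, hp, hq, PySem.List.foldl_append_singleton_eq_map,
    PySem.List.foldl_append_eq_flatMap, pvBlockA]

theorem pvFoldA (d : PySem.Dict String (List (String × List String)))
    (l : List (String × List (String × List String))) (acc : List (Int × String))
    (hl : ∀ p ∈ l, d.getD p.1 [] = p.2) :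
    (PySem.List.combinations (l.map Prod.fst) 2).foldl (pvStepA d) acc
      = acc ++ pvLA (l.map Prod.snd) := by
  induction l generalizing acc with
  | nil => simp [PySem.List.combinations_nil_succ, pvLA]
  | cons p rest ih =>
    have hp := hl p (List.mem_cons_self ..)
    have hrest : ∀ q ∈ rest, d.getD q.1 [] = q.2 := fun q hq => hl q (List.mem_cons_of_mem _ hq)
    rw [List.map_cons, PySem.List.combinations_cons_succ, PySem.List.combinations_one,
      List.foldl_append, List.map_map, List.map_map, List.foldl_map,
      show (1 : Nat) + 1 = 2 from rfl]
    simp only [Function.comp_def]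
    rw [PySem.List.foldl_congr_mem rest _ (fun acc q => acc ++ pvBlockA p.2 q.2) acc
      (fun acc q hq => pvStepA_pair d p q acc hp (hrest q hq)),
      PySem.List.foldl_append_eq_flatMap, ih _ hrest]
    simp [pvLA, List.flatMap_map]

theorem pvRowOf_eq_keys (v : List (String × List String)) :
    pvRowOf v = (PySem.Dict.ofList v).keys.map
      (fun ss => (ss, PySem.Set.ofList ((PySem.Dict.ofList v).getD ss []))) := by
  rw [pvRowOf, PySem.Dict.items_eq_map_keys _ (PySem.Dict.nodup_keys_ofList v) [], List.map_map]
  rfl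

theorem pvMemBridge (vs : List (List (String × List String))) (c : Int × String) :
    c ∈ pvCands (vs.map pvRowOf) ↔ c ∈ pvLA vs := by
  induction vs with
  | nil => simp [pvCands, pvLA]
  | cons v rest ih =>
    simp only [List.map_cons, pvCands, pvLA, List.mem_append, ih]
    apply or_congr_left
    rw [pvRowOf_eq_keys]
    simp only [pvBlockA, List.mem_flatMap, List.mem_map]
    constructor
    · rintro ⟨p, ⟨ss, hss, rfl⟩, o, ⟨v2, hv2, rfl⟩, q, hq, rfl⟩
      rw [pvRowOf_eq_keys] at hq
      obtain ⟨pp, hpp, rfl⟩ := List.mem_map.mp hq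
      exact ⟨v2, hv2, ss, hss, pp, hpp, rfl⟩
    · rintro ⟨v2, hv2, ss, hss, pp, hpp, rfl⟩
      refine ⟨_, ⟨ss, hss, rfl⟩, _, ⟨v2, hv2, rfl⟩,
        (pp, PySem.Set.ofList ((PySem.Dict.ofList v2).getD pp [])), ?_, rfl⟩
      rw [pvRowOf_eq_keys]
      exact List.mem_map_of_mem hpp

theorem pvBefore_eq :
    (fun a b : Int × String =>
      decide (b.1 < a.1) || (!decide (a.1 < b.1) && decide (b.2 < a.2)))
    = (fun a b : Int × String => decide (pvKey b < pvKey a)) := by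
  funext a b
  simp only [pvKey, Prod.Lex.lt_iff, ofLex_toLex]
  by_cases h1 : b.1 < a.1
  · simp [h1]
  · by_cases h2 : a.1 < b.1
    · have : ¬ b.1 = a.1 := by omega
      simp [h1, h2, this]
    · have : b.1 = a.1 := by omega
      simp [this]

theorem pvFoldInsert_pairwise (xs acc : List (Int × String))
    (hacc : acc.Pairwise (fun a b => pvKey b ≤ pvKey a)) :
    (xs.foldl (fun acc x =>
        PySem.List.insertBy (fun a b => decide (pvKey b < pvKey a)) x acc) acc).Pairwise
      (fun a b => pvKey b ≤ pvKey a) := by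
  induction xs generalizing acc with
  | nil => exact hacc
  | cons x t ih =>
    exact ih _ (PySem.List.insertBy_pairwise_ge pvKey x acc hacc)

-- the head of A's reverse-sorted candidate list is a maximum for the tuple order
theorem pvSortedHead (xs : List (Int × String)) (m : Int × String) (t : List (Int × String))
    (h : PySem.List.sorted2 xs Prod.fst Prod.snd true = m :: t) :
    m ∈ xs ∧ ∀ y ∈ xs, pvKey y ≤ pvKey m := by
  have hperm : (m :: t).Perm xs := by
    rw [← h]; exact PySem.List.sorted2_perm xs Prod.fst Prod.snd true
  have hpw : (m :: t).Pairwise (fun a b => pvKey b ≤ pvKey a) := by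
    rw [← h]
    simp only [PySem.List.sorted2]
    rw [show (fun a b : Int × String =>
        decide (b.1 < a.1) || (!decide (a.1 < b.1) && decide (b.2 < a.2)))
      = (fun a b : Int × String => decide (pvKey b < pvKey a)) from pvBefore_eq]
    exact pvFoldInsert_pairwise xs [] (by simp)
  refine ⟨hperm.subset (List.mem_cons_self ..), ?_⟩
  intro y hy
  rcases List.mem_cons.mp (hperm.symm.subset hy) with rfl | hyt
  · exact le_refl _
  · exact (List.pairwise_cons.mp hpw).1 y hyt

-- nonemptiness of the candidate list under Pre_
theorem pvKeys_ofList {ν : Type} (ps : List (String × ν)) :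
    (PySem.Dict.ofList ps).keys = PySem.Set.ofList (ps.map Prod.fst) := by
  show (List.foldl (fun acc p => acc.insert p.1 p.2) PySem.Dict.empty ps).keys = _
  rw [PySem.Dict.keys_foldl_insert_key ps Prod.fst (fun _ x => x.2) PySem.Dict.empty]
  rw [PySem.Dict.keys_empty, PySem.Set.update_nil_left]

theorem pvKeys_ne_nil {ν : Type} (ps : List (String × ν)) (h : ps ≠ []) :
    ∃ k, k ∈ (PySem.Dict.ofList ps).keys := by
  obtain ⟨p, t, rfl⟩ := List.exists_cons_of_ne_nil h
  exact ⟨p.1, by rw [pvKeys_ofList]; exact (PySem.Set.mem_ofList _ _).mpr (by simp)⟩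

theorem pvBlockA_nonempty (v1 v2 : List (String × List String))
    (h1 : v1 ≠ []) (h2 : v2 ≠ []) : ∃ c, c ∈ pvBlockA v1 v2 := by
  obtain ⟨ss, hss⟩ := pvKeys_ne_nil v1 h1
  obtain ⟨pp, hpp⟩ := pvKeys_ne_nil v2 h2
  refine ⟨((PySem.Set.len (PySem.Set.inter
      (PySem.Set.ofList ((PySem.Dict.ofList v1).getD ss []))
      (PySem.Set.ofList ((PySem.Dict.ofList v2).getD pp [])))), ss), ?_⟩
  simp only [pvBlockA, List.mem_flatMap, List.mem_map]
  exact ⟨ss, hss, ⟨pp, hpp, rfl⟩⟩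

theorem pvLA_nonempty (vs : List (List (String × List String)))
    (h : 2 ≤ (vs.filter (fun v => !v.isEmpty)).length) : ∃ c, c ∈ pvLA vs := by
  induction vs with
  | nil => simp at h
  | cons v rest ih =>
    by_cases hv : v.isEmpty
    · rw [List.filter_cons_of_neg (by simp [hv])] at h
      obtain ⟨c, hc⟩ := ih h
      exact ⟨c, by simp [pvLA, hc]⟩
    · rw [List.filter_cons_of_pos (by simp [hv])] at h
      have h1 : 1 ≤ (rest.filter (fun v => !v.isEmpty)).length := by
        simpa using h
      have hne : rest.filter (fun v => !v.isEmpty) ≠ [] := by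
        intro he; rw [he] at h1; simp at h1
      obtain ⟨v2, t, he⟩ := List.exists_cons_of_ne_nil hne
      have hv2 : v2 ∈ rest ∧ ¬ v2.isEmpty := by
        have : v2 ∈ rest.filter (fun v => !v.isEmpty) := by rw [he]; simp
        have := List.mem_filter.mp this
        simpa using this
      obtain ⟨c, hc⟩ := pvBlockA_nonempty v v2
        (by simpa using hv) (by simpa using hv2.2)
      exact ⟨c, by simp only [pvLA, List.mem_append, List.mem_flatMap]
                   exact Or.inl ⟨v2, hv2.1, hc⟩⟩

-- ===== VERDICT (by name: the statement is the Claim_ definition above) =====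
theorem compare_overlaps3_spec : Claim_equal_compare_overlaps3 := by
  intro wordsign_dict nbest keepscore normalizescore _hdom hpre
  unfold Spec_compare_overlaps3
  unfold Pre_compare_overlaps3 at hpre
  set d := PySem.Dict.ofList wordsign_dict with hd
  -- A's candidate list is pvLA of the stored word values
  have hA : (PySem.List.combinations d.keys 2).foldl (pvStepA d) [] = pvLA d.values := by
    rw [PySem.Dict.keys.eq_1, PySem.Dict.values.eq_1]
    have := pvFoldA d d.items []
      (fun p hp => PySem.Dict.getD_of_mem_items d hp (PySem.Dict.nodup_keys_ofList _) [])
    simpa using this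
  -- the shared candidate pool is nonempty
  obtain ⟨c0, hc0⟩ := pvLA_nonempty d.values hpre
  -- A's value
  cases hs : PySem.List.sorted2 (pvLA d.values) Prod.fst Prod.snd true with
  | nil =>
    exfalso
    have hperm := PySem.List.sorted2_perm (pvLA d.values) Prod.fst Prod.snd true
    rw [hs] at hperm
    rw [List.Perm.eq_nil hperm.symm] at hc0
    simp at hc0
  | cons m t =>
    have hAport : compare_overlaps3 wordsign_dict nbest keepscore normalizescore = m := by
      show (match PySem.List.sorted2
          ((PySem.List.combinations (PySem.Dict.ofList wordsign_dict).keys 2).foldl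
            (pvStepA (PySem.Dict.ofList wordsign_dict)) []) Prod.fst Prod.snd true with
        | r :: _ => r
        | [] => ((0 : Int), "")) = m
      rw [← hd, hA, hs]
    obtain ⟨hmemA, hmaxA⟩ := pvSortedHead _ m t hs
    -- B's value
    have hBscan : pvScan (d.values.map pvRowOf) none
        = (pvCands (d.values.map pvRowOf)).foldl pvBump none := pvScan_eq _ _
    have hc0' : c0 ∈ pvCands (d.values.map pvRowOf) := (pvMemBridge _ c0).mpr hc0
    cases hm' : (pvCands (d.values.map pvRowOf)).foldl pvBump none with
    | none =>
      exfalso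
      cases hcs : pvCands (d.values.map pvRowOf) with
      | nil => rw [hcs] at hc0'; simp at hc0'
      | cons c1 t1 =>
        rw [hcs] at hm'
        simp only [List.foldl_cons, pvBump] at hm'
        exact pvBump_ne_none t1 c1 hm'
    | some m' =>
      have hBport : compare_overlaps3_alt wordsign_dict nbest keepscore normalizescore = m' := by
        show (match pvScan ((PySem.Dict.ofList wordsign_dict).values.map pvRowOf) none with
          | some t => t
          | none => ((0 : Int), "")) = m'
        rw [← hd, hBscan, hm']
      obtain ⟨hmem', hmax', _⟩ := pvBump_max _ none m' hm'
      have hmemB : m' ∈ pvLA d.values := by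
        rcases hmem' with h | h
        · exact absurd h (by simp)
        · exact (pvMemBridge _ m').mp h
      have hle1 : pvKey m ≤ pvKey m' := hmax' m ((pvMemBridge _ m).mpr hmemA)
      have hle2 : pvKey m' ≤ pvKey m := hmaxA m' hmemB
      have : m = m' := toLex.injective (le_antisymm hle1 hle2)
      rw [hAport, hBport, this]
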